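-- pv_equiv track=rewrite | github.com/oxisakre/proyectosdePY | sumarlistas.py | repeat_sum
-- ===== SOURCE A (Python) =====
-- def repeat_sum(l):
--     list_number = -1
--     sumar = []
--     if len(l) == 1:
--         return 0
--     else:
--         for i in l:
--             list_number += 1
--             for j in l[list_number]:
--                 for t in range(0, len(l) - 1):
--                     if t == (list_number):
--                         continue
--                     elif j in l[t] and j not in sumar:
--                         sumar.append(j)
--     return sum(sumar)
-- ===== SOURCE B (Python) =====
-- def repeat_sum(l):
--     seen = set()      # values seen in some earlier sublist
--     repeated = set()  # values appearing in at least two sublists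
--     for sub in l:
--         s = set(sub)
--         repeated |= (s & seen)
--         seen |= s
--     return sum(repeated)
-- ===== Notes on version B (the rewrite author's own statement) =====
-- stated objective: faster
-- what changed: Replaced A's triple nested loop (for each element of each sublist, scanning all other sublists and a growing membership list) with a single pass over the sublists maintaining two hash sets (values seen so far, values seen in at least two sublists), summing the second set at the end.
import Mathlib
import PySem

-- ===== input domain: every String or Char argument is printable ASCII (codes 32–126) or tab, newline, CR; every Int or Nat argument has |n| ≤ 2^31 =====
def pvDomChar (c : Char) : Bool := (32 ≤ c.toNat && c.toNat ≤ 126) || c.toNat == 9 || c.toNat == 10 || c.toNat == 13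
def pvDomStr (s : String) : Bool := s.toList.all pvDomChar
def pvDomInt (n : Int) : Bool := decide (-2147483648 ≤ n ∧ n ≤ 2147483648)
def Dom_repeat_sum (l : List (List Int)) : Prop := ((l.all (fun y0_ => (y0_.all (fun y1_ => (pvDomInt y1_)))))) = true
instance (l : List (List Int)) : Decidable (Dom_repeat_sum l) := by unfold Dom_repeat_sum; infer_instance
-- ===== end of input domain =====

-- B replaces A's triple nested scan over all other sublists with a single pass keeping two sets
-- (values seen so far / values seen in ≥2 sublists); objective: faster (asymptotic).

-- ===== PORT A =====
-- innermost loop of A: 'for t in range(0, len(l)-1): …'.  'l[t]' never raises here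
-- (t < len(l)-1 < len(l)), so the total pyGetD with default [] is exact.
def pvAInner (l : List (List Int)) (ln : Int) (sumar : List Int) (j : Int) : List Int :=
  (PySem.List.pyRange 0 ((l.length : Int) - 1) 1).foldl
    (fun s t =>
      if t == ln then s
      else if decide (j ∈ PySem.List.pyGetD l t []) && !decide (j ∈ s) then s ++ [j] else s)
    sumar

-- one iteration of A's outer 'for i in l' (state = (list_number, sumar))
def pvAStep (l : List (List Int)) (st : Int × List Int) (i : List Int) : Int × List Int :=
  (st.1 + 1, i.foldl (pvAInner l (st.1 + 1)) st.2)

def repeat_sum (l : List (List Int)) : Int :=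
  if l.length == 1 then 0
  else (l.foldl (pvAStep l) (-1, [])).2.sum

-- ===== PORT B =====
-- one iteration of B's loop (state = (seen, repeated)); 'repeated |= s & seen; seen |= s'
def pvBStep (st : PySem.Set Int × PySem.Set Int) (sub : List Int) : PySem.Set Int × PySem.Set Int :=
  (PySem.Set.union st.1 (PySem.Set.ofList sub),
   PySem.Set.union st.2 (PySem.Set.inter (PySem.Set.ofList sub) st.1))

def repeat_sum_alt (l : List (List Int)) : Int :=
  (l.foldl pvBStep (PySem.Set.empty, PySem.Set.empty)).2.sum

-- ===== PRECONDITION & SPEC =====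
def Spec_repeat_sum (l : List (List Int)) (out : Int) : Prop := out = repeat_sum_alt l
instance (l : List (List Int)) (out : Int) : Decidable (Spec_repeat_sum l out) := by unfold Spec_repeat_sum; infer_instance

-- ===== CLAIM (what is proved, stated in full; the proofs are below) =====
def Claim_equal_repeat_sum : Prop := ∀ (l : List (List Int)), Dom_repeat_sum l → Spec_repeat_sum l (repeat_sum l)

-- ===== LEMMAS AND PROOFS =====

-- the value-level meaning of both programs: v lies in two distinct sublists of l
abbrev pvP (l : List (List Int)) (v : Int) : Prop :=
  ∃ i j : Nat, i < j ∧ j < l.length ∧ v ∈ l.getD i [] ∧ v ∈ l.getD j []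

-- A's condition for appending j while scanning sublist number ln
abbrev pvQ (l : List (List Int)) (ln j : Int) : Prop :=
  ∃ t ∈ PySem.List.pyRange 0 ((l.length : Int) - 1) 1, t ≠ ln ∧ j ∈ PySem.List.pyGetD l t []

lemma pvAInner_of_mem (l : List (List Int)) (ln j : Int) (ts : List Int) (s : List Int)
    (h : j ∈ s) :
    ts.foldl (fun s t =>
      if t == ln then s
      else if decide (j ∈ PySem.List.pyGetD l t []) && !decide (j ∈ s) then s ++ [j] else s) s = s := by
  induction ts with
  | nil => rfl
  | cons t ts ih =>
    rw [List.foldl_cons,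
      show (if t == ln then s
        else if decide (j ∈ PySem.List.pyGetD l t []) && !decide (j ∈ s) then s ++ [j] else s) = s
        from by simp [h]]
    exact ih

lemma pvAInner_eq (l : List (List Int)) (ln j : Int) (ts : List Int) (s : List Int) :
    ts.foldl (fun s t =>
      if t == ln then s
      else if decide (j ∈ PySem.List.pyGetD l t []) && !decide (j ∈ s) then s ++ [j] else s) s
    = if (∃ t ∈ ts, t ≠ ln ∧ j ∈ PySem.List.pyGetD l t []) ∧ j ∉ s then s ++ [j] else s := by
  induction ts generalizing s with
  | nil => simp
  | cons t ts ih =>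
    rw [List.foldl_cons]
    by_cases hj : j ∈ s
    · rw [show (if t == ln then s
          else if decide (j ∈ PySem.List.pyGetD l t []) && !decide (j ∈ s) then s ++ [j] else s) = s
          from by simp [hj]]
      rw [pvAInner_of_mem l ln j ts s hj]
      simp [hj]
    · by_cases ht : t = ln
      · rw [show (if t == ln then s
            else if decide (j ∈ PySem.List.pyGetD l t []) && !decide (j ∈ s) then s ++ [j] else s) = s
            from by simp [ht]]
        rw [ih s]
        refine (if_congr ?_ rfl rfl)
        constructor
        · rintro ⟨⟨t', ht', h1, h2⟩, h3⟩
          exact ⟨⟨t', List.mem_cons_of_mem _ ht', h1, h2⟩, h3⟩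
        · rintro ⟨⟨t', ht', h1, h2⟩, h3⟩
          rcases List.mem_cons.mp ht' with rfl | ht'
          · exact absurd ht h1
          · exact ⟨⟨t', ht', h1, h2⟩, h3⟩
      · by_cases hmem : j ∈ PySem.List.pyGetD l t []
        · rw [show (if t == ln then s
              else if decide (j ∈ PySem.List.pyGetD l t []) && !decide (j ∈ s) then s ++ [j] else s)
              = s ++ [j] from by simp [ht, hmem, hj]]
          rw [pvAInner_of_mem l ln j ts (s ++ [j]) (by simp)]
          have : (∃ t' ∈ t :: ts, t' ≠ ln ∧ j ∈ PySem.List.pyGetD l t' []) ∧ j ∉ s :=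
            ⟨⟨t, List.mem_cons_self, ht, hmem⟩, hj⟩
          rw [if_pos this]
        · rw [show (if t == ln then s
              else if decide (j ∈ PySem.List.pyGetD l t []) && !decide (j ∈ s) then s ++ [j] else s) = s
              from by simp [hmem]]
          rw [ih s]
          by_cases hq : ∃ t' ∈ ts, t' ≠ ln ∧ j ∈ PySem.List.pyGetD l t' []
          · rw [if_pos ⟨hq, hj⟩]
            rcases hq with ⟨t', ht', h1, h2⟩
            exact (if_pos ⟨⟨t', List.mem_cons_of_mem _ ht', h1, h2⟩, hj⟩).symm
          · rw [if_neg (fun h => hq h.1)]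
            refine (if_neg ?_).symm
            rintro ⟨⟨t', ht', h1, h2⟩, -⟩
            rcases List.mem_cons.mp ht' with rfl | ht'
            · exact hmem h2
            · exact hq ⟨t', ht', h1, h2⟩

lemma pvAInner_char (l : List (List Int)) (ln : Int) (s : List Int) (j : Int) :
    pvAInner l ln s j = if pvQ l ln j ∧ j ∉ s then s ++ [j] else s := by
  unfold pvAInner pvQ; exact pvAInner_eq l ln j _ s

lemma pvAMid_mem (l : List (List Int)) (ln : Int) (js : List Int) (s : List Int) (v : Int) :
    v ∈ js.foldl (pvAInner l ln) s ↔ v ∈ s ∨ (v ∈ js ∧ pvQ l ln v) := by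
  induction js generalizing s with
  | nil => simp
  | cons j js ih =>
    simp only [List.foldl_cons, ih, pvAInner_char]
    have : v ∈ (if pvQ l ln j ∧ j ∉ s then s ++ [j] else s) ↔ v ∈ s ∨ (v = j ∧ pvQ l ln j) := by
      split_ifs with h
      · simp only [List.mem_append, List.mem_singleton]
        constructor
        · rintro (hv | rfl)
          · exact Or.inl hv
          · exact Or.inr ⟨rfl, h.1⟩
        · rintro (hv | ⟨rfl, _⟩)
          · exact Or.inl hv
          · simp
      · constructor
        · exact Or.inl
        · rintro (hv | ⟨rfl, hq⟩)
          · exact hv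
          · cases not_and_or.mp h with
            | inl h => exact absurd hq h
            | inr h => exact not_not.mp h
    rw [this]
    constructor
    · rintro ((hv | ⟨rfl, hq⟩) | ⟨hv, hq⟩)
      · exact Or.inl hv
      · exact Or.inr ⟨List.mem_cons_self, hq⟩
      · exact Or.inr ⟨List.mem_cons_of_mem _ hv, hq⟩
    · rintro (hv | ⟨hv, hq⟩)
      · exact Or.inl (Or.inl hv)
      · rcases List.mem_cons.mp hv with rfl | hv
        · exact Or.inl (Or.inr ⟨rfl, hq⟩)
        · exact Or.inr ⟨hv, hq⟩

lemma pvAMid_nodup (l : List (List Int)) (ln : Int) (js : List Int) (s : List Int)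
    (hs : s.Nodup) : (js.foldl (pvAInner l ln) s).Nodup := by
  induction js generalizing s with
  | nil => exact hs
  | cons j js ih =>
    simp only [List.foldl_cons]
    apply ih
    rw [pvAInner_char]
    split_ifs with h
    · exact List.Nodup.append hs (List.nodup_singleton j) (by simp [h.2])
    · exact hs

lemma pvAOuter_mem (l : List (List Int)) (xs : List (List Int)) (c : Int) (s : List Int) (v : Int) :
    v ∈ (xs.foldl (pvAStep l) (c, s)).2 ↔
      v ∈ s ∨ ∃ k : Nat, k < xs.length ∧ v ∈ xs.getD k [] ∧ pvQ l (c + 1 + k) v := by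
  induction xs generalizing c s with
  | nil => simp
  | cons x xs ih =>
    simp only [List.foldl_cons, pvAStep, ih, pvAMid_mem]
    constructor
    · rintro ((hv | ⟨hv, hq⟩) | ⟨k, hk, hv, hq⟩)
      · exact Or.inl hv
      · exact Or.inr ⟨0, by simp, by simpa using hv, by simpa using hq⟩
      · refine Or.inr ⟨k + 1, by simpa using hk, by simpa using hv, ?_⟩
        have : c + 1 + 1 + (k : Int) = c + 1 + ((k : Nat) + 1 : Nat) := by push_cast; ring
        rwa [← this]
    · rintro (hv | ⟨k, hk, hv, hq⟩)
      · exact Or.inl (Or.inl hv)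
      · cases k with
        | zero => exact Or.inl (Or.inr ⟨by simpa using hv, by simpa using hq⟩)
        | succ k =>
          refine Or.inr ⟨k, by simpa using hk, by simpa using hv, ?_⟩
          have : c + 1 + 1 + (k : Int) = c + 1 + ((k : Nat) + 1 : Nat) := by push_cast; ring
          rwa [this]

lemma pvAOuter_nodup (l : List (List Int)) (xs : List (List Int)) (c : Int) (s : List Int)
    (hs : s.Nodup) : (xs.foldl (pvAStep l) (c, s)).2.Nodup := by
  induction xs generalizing c s with
  | nil => exact hs
  | cons x xs ih => exact ih _ _ (pvAMid_nodup l _ x s hs)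

-- A's append condition, at counter k, is exactly 'v lies in two distinct sublists'
lemma pvA_char (l : List (List Int)) (v : Int) :
    (∃ k : Nat, k < l.length ∧ v ∈ l.getD k [] ∧ pvQ l (k : Int) v) ↔ pvP l v := by
  constructor
  · rintro ⟨k, hk, hv, t, ht, htk, hvt⟩
    rw [PySem.List.mem_pyRange_one] at ht
    have h0 : 0 ≤ t := ht.1
    have hlt : t < (l.length : Int) - 1 := ht.2
    set tn := t.toNat with htn
    have htt : (tn : Int) = t := Int.toNat_of_nonneg h0
    have htl : tn < l.length := by omega
    have hne : tn ≠ k := by omega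
    have hvtn : v ∈ l.getD tn [] := by
      rw [List.getD_eq_getElem _ _ htl]
      rwa [PySem.List.pyGetD_eq_getElem l [] h0 (by omega)] at hvt
    rcases Nat.lt_or_ge tn k with h | h
    · exact ⟨tn, k, h, hk, hvtn, hv⟩
    · exact ⟨k, tn, by omega, htl, hv, hvtn⟩
  · rintro ⟨i, j, hij, hj, hvi, hvj⟩
    refine ⟨j, hj, hvj, (i : Int), ?_, by exact_mod_cast (by omega : i ≠ j), ?_⟩
    · rw [PySem.List.mem_pyRange_one]; omega
    · rw [PySem.List.pyGetD_natCast]; exact hvi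

lemma pvBRep_mem (xs : List (List Int)) (seen rep : PySem.Set Int) (v : Int) :
    v ∈ (xs.foldl pvBStep (seen, rep)).2 ↔
      v ∈ rep ∨ ∃ k : Nat, k < xs.length ∧ v ∈ xs.getD k [] ∧
        (v ∈ seen ∨ ∃ k' : Nat, k' < k ∧ v ∈ xs.getD k' []) := by
  induction xs generalizing seen rep with
  | nil => simp
  | cons x xs ih =>
    rw [List.foldl_cons, show pvBStep (seen, rep) x =
      (PySem.Set.union seen (PySem.Set.ofList x),
       PySem.Set.union rep (PySem.Set.inter (PySem.Set.ofList x) seen)) from rfl, ih]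
    simp only [PySem.Set.mem_union, PySem.Set.mem_inter, PySem.Set.mem_ofList]
    constructor
    · rintro ((h | ⟨hvx, hvs⟩) | ⟨k, hk, hv, hrest⟩)
      · exact Or.inl h
      · exact Or.inr ⟨0, by simp, by simpa using hvx, Or.inl hvs⟩
      · refine Or.inr ⟨k + 1, by simpa using hk, by simpa using hv, ?_⟩
        rcases hrest with (hvs | hvx) | ⟨k', hk', hv'⟩
        · exact Or.inl hvs
        · exact Or.inr ⟨0, by omega, by simpa using hvx⟩
        · exact Or.inr ⟨k' + 1, by omega, by simpa using hv'⟩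
    · rintro (h | ⟨k, hk, hv, hrest⟩)
      · exact Or.inl (Or.inl h)
      · cases k with
        | zero =>
          rcases hrest with hvs | ⟨k', hk', _⟩
          · exact Or.inl (Or.inr ⟨by simpa using hv, hvs⟩)
          · omega
        | succ k =>
          refine Or.inr ⟨k, by simpa using hk, by simpa using hv, ?_⟩
          rcases hrest with hvs | ⟨k', hk', hv'⟩
          · exact Or.inl (Or.inl hvs)
          · cases k' with
            | zero => exact Or.inl (Or.inr (by simpa using hv'))
            | succ k' => exact Or.inr ⟨k', by omega, by simpa using hv'⟩

lemma pvBRep_nodup (xs : List (List Int)) (st : PySem.Set Int × PySem.Set Int)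
    (h : st.2.Nodup) : (xs.foldl pvBStep st).2.Nodup := by
  induction xs generalizing st with
  | nil => exact h
  | cons x xs ih => exact ih _ (PySem.Set.nodup_union _ _ h)

lemma pvB_char (l : List (List Int)) (v : Int) :
    v ∈ (l.foldl pvBStep (PySem.Set.empty, PySem.Set.empty)).2 ↔ pvP l v := by
  rw [pvBRep_mem]
  constructor
  · rintro (h | ⟨k, hk, hv, (h | ⟨k', hk', hv'⟩)⟩)
    · exact absurd h List.not_mem_nil
    · exact absurd h List.not_mem_nil
    · exact ⟨k', k, hk', hk, hv', hv⟩
  · rintro ⟨i, j, hij, hj, hvi, hvj⟩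
    exact Or.inr ⟨j, hj, hvj, Or.inr ⟨i, hij, hvi⟩⟩

-- ===== VERDICT (by name: the statement is the Claim_ definition above) =====
theorem repeat_sum_spec : Claim_equal_repeat_sum := by
  intro l _
  unfold Spec_repeat_sum repeat_sum repeat_sum_alt
  set rep := (l.foldl pvBStep (PySem.Set.empty, PySem.Set.empty)).2 with hrep
  have hrnd : rep.Nodup := pvBRep_nodup l _ List.nodup_nil
  by_cases h1 : l.length = 1
  · simp only [h1, beq_self_eq_true, if_true]
    have : rep = [] := by
      rw [List.eq_nil_iff_forall_not_mem]
      intro v hv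
      rcases (pvB_char l v).mp hv with ⟨i, j, hij, hj, _⟩
      omega
    rw [this]; rfl
  · simp only [beq_iff_eq, h1, if_false]
    set sa := (l.foldl (pvAStep l) (-1, [])).2 with hsa
    have hand : sa.Nodup := pvAOuter_nodup l l (-1) [] List.nodup_nil
    have hmem : ∀ v, v ∈ sa ↔ v ∈ rep := by
      intro v
      rw [hsa, pvAOuter_mem, pvB_char, ← pvA_char]
      simp only [List.not_mem_nil, false_or]
      constructor <;> rintro ⟨k, hk, hv, hq⟩ <;>
        exact ⟨k, hk, hv, by convert hq using 2; push_cast; ring⟩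
    exact List.Perm.sum_eq ((List.perm_ext_iff_of_nodup hand hrnd).mpr hmem)
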